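-- pv_equiv track=rewrite | github.com/LinhT-6104/Learning_Code | DaNangCodeLeague/Chuoi_ky_tu_quang_ba.py | check
-- ===== SOURCE A (Python) =====
-- def check(S):
--     i = 0
--     while i < len(S):
--         if S[i:i+3] == "FDD":
--             i += 3
--         elif S[i:i+2] == "FD":
--             i += 2
--         elif S[i] == "F":
--             i += 1
--         else:
--             return "No"
--     return "Yes"
-- ===== SOURCE B (Python) =====
-- def check(S):
--     if any(c not in "FD" for c in S):
--         return "No"
--     if S.startswith("D") or "DDD" in S:
--         return "No"
--     return "Yes"
-- ===== Notes on version B (the rewrite author's own statement) =====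
-- stated objective: idiomatic
-- what changed: Replaced the greedy cursor-advancing F/FD/FDD tokenizer with three whole-string predicate checks: every character is F or D, the string does not start with D, and no run of three consecutive D characters occurs.
import Mathlib
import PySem

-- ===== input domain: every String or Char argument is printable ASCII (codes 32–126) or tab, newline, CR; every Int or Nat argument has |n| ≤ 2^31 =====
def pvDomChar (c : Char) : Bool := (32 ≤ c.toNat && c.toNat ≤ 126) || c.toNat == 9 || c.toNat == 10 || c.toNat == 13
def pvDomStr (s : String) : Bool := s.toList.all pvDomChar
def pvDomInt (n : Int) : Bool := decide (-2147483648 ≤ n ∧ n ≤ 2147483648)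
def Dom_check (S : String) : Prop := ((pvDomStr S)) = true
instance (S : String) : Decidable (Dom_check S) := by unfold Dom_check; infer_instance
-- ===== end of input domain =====

-- B replaces A's greedy F/FD/FDD cursor tokenizer by whole-string predicate checks (alphabet {F,D}, no leading 'D', no "DDD" substring); idiomatic, same cost.

-- ===== PORT A =====
-- A's while loop: cursor i over S, testing S[i:i+3] == "FDD", S[i:i+2] == "FD", S[i] == "F".
-- fuel only makes the recursion structural; fuel = |S| always suffices (i grows by ≥ 1 per step).
def checkLoop : Nat → List Char → Nat → String
  | 0, _, _ => "Yes"
  | fuel + 1, cs, i =>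
    if h : i < cs.length then
      if PySem.List.slice cs (some (i : Int)) (some ((i + 3 : Nat) : Int)) = ['F', 'D', 'D'] then
        checkLoop fuel cs (i + 3)
      else if PySem.List.slice cs (some (i : Int)) (some ((i + 2 : Nat) : Int)) = ['F', 'D'] then
        checkLoop fuel cs (i + 2)
      else if cs[i] = 'F' then
        checkLoop fuel cs (i + 1)
      else "No"
    else "Yes"

def check (S : String) : String := checkLoop S.toList.length S.toList 0

-- ===== PORT B =====
def check_alt (S : String) : String :=
  if S.toList.any (fun c => !(c == 'F' || c == 'D')) then "No"
  else if PySem.Str.startswith S "D" || PySem.Str.isIn "DDD" S then "No"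
  else "Yes"

-- ===== PRECONDITION & SPEC =====
def Spec_check (S : String) (out : String) : Prop := out = check_alt S
instance (S : String) (out : String) : Decidable (Spec_check S out) := by unfold Spec_check; infer_instance

-- ===== CLAIM (what is proved, stated in full; the proofs are below) =====
def Claim_equal_check : Prop := ∀ (S : String), Dom_check S → Spec_check S (check S)

-- ===== LEMMAS AND PROOFS =====

-- A's loop, rephrased structurally on the suffix it still has to read
def go : List Char → String
  | [] => "Yes"
  | 'F' :: 'D' :: 'D' :: rest => go rest
  | 'F' :: 'D' :: rest => go rest
  | 'F' :: rest => go rest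
  | _ => "No"

-- the validity property B tests
def Ok (l : List Char) : Prop :=
  (∀ c ∈ l, c = 'F' ∨ c = 'D') ∧ ¬ ['D'] <+: l ∧ ¬ ['D', 'D', 'D'] <:+: l

lemma d_prefix_iff (c : Char) (l : List Char) : ['D'] <+: (c :: l) ↔ c = 'D' := by
  rw [List.cons_prefix_cons]; simp [eq_comm]

lemma dd_prefix_iff (c : Char) (l : List Char) :
    ['D', 'D'] <+: (c :: l) ↔ c = 'D' ∧ ['D'] <+: l := by
  rw [List.cons_prefix_cons]; simp [eq_comm]

lemma ddd_cons (c : Char) (l : List Char) :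
    ['D', 'D', 'D'] <:+: (c :: l) ↔ (c = 'D' ∧ ['D', 'D'] <+: l) ∨ ['D', 'D', 'D'] <:+: l := by
  rw [List.infix_cons_iff, List.cons_prefix_cons]; tauto

lemma dd_prefix_mono (r : List Char) (h : ['D', 'D'] <+: r) : ['D'] <+: r :=
  List.IsPrefix.trans ⟨['D'], rfl⟩ h

lemma ok_fdd (r : List Char) : Ok ('F' :: 'D' :: 'D' :: r) ↔ Ok r := by
  unfold Ok
  rw [List.forall_mem_cons, List.forall_mem_cons, List.forall_mem_cons,
      d_prefix_iff, ddd_cons, ddd_cons, ddd_cons, dd_prefix_iff, dd_prefix_iff, d_prefix_iff]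
  have hm := dd_prefix_mono r
  have e1 : ('F' : Char) = 'F' := rfl
  have e2 : ('D' : Char) = 'D' := rfl
  have e3 : ¬ ('F' : Char) = 'D' := by decide
  tauto

lemma ok_fd (c : Char) (r : List Char) (hc : c ≠ 'D') :
    Ok ('F' :: 'D' :: c :: r) ↔ Ok (c :: r) := by
  unfold Ok
  rw [List.forall_mem_cons, List.forall_mem_cons, d_prefix_iff, d_prefix_iff,
      ddd_cons, ddd_cons, dd_prefix_iff, d_prefix_iff c r, dd_prefix_iff c r]
  have e1 : ('F' : Char) = 'F' := rfl
  have e2 : ('D' : Char) = 'D' := rfl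
  have e3 : ¬ ('F' : Char) = 'D' := by decide
  tauto

lemma ok_f (c : Char) (r : List Char) (hc : c ≠ 'D') :
    Ok ('F' :: c :: r) ↔ Ok (c :: r) := by
  unfold Ok
  rw [List.forall_mem_cons, d_prefix_iff, d_prefix_iff, ddd_cons]
  have e1 : ('F' : Char) = 'F' := rfl
  have e3 : ¬ ('F' : Char) = 'D' := by decide
  tauto

lemma not_ok (c : Char) (r : List Char) (hc : c ≠ 'F') : ¬ Ok (c :: r) := by
  unfold Ok
  rw [List.forall_mem_cons, d_prefix_iff]
  rintro ⟨⟨hF | hD, -⟩, h2, -⟩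
  · exact hc hF
  · exact h2 hD

lemma ok_nil : Ok ([] : List Char) := by
  refine ⟨by simp, by simp, by simp [List.infix_nil]⟩

lemma ok_f_nil : Ok ['F'] := by
  refine ⟨by simp, by simp, ?_⟩
  simp [ddd_cons, List.infix_nil]

lemma ok_fd_nil : Ok ['F', 'D'] := by
  refine ⟨by simp, by simp, ?_⟩
  simp [ddd_cons, List.infix_nil]

lemma go_yes_iff (l : List Char) : go l = "Yes" ↔ Ok l := by
  rcases l with _ | ⟨c, l1⟩
  · exact iff_of_true (by decide) ok_nil
  · by_cases hc : c = 'F'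
    · subst hc
      rcases l1 with _ | ⟨d, l2⟩
      · exact iff_of_true (by decide) ok_f_nil
      · by_cases hd : d = 'D'
        · subst hd
          rcases l2 with _ | ⟨e, l3⟩
          · exact iff_of_true (by decide) ok_fd_nil
          · by_cases he : e = 'D'
            · subst he
              rw [show go ('F' :: 'D' :: 'D' :: l3) = go l3 from by simp [go],
                  go_yes_iff l3, ok_fdd]
            · rw [show go ('F' :: 'D' :: e :: l3) = go (e :: l3) from by simp [go, he],
                  go_yes_iff (e :: l3), ok_fd e l3 he]
        · rw [show go ('F' :: d :: l2) = go (d :: l2) from by simp [go, hd],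
              go_yes_iff (d :: l2), ok_f d l2 hd]
    · rw [show go (c :: l1) = "No" from by simp [go, hc]]
      exact iff_of_false (by decide) (not_ok c l1 hc)
termination_by l.length

lemma go_yes_or_no (l : List Char) : go l = "Yes" ∨ go l = "No" := by
  fun_induction go <;> simp_all

lemma loop_eq_go (fuel : Nat) (cs : List Char) (i : Nat) (hf : cs.length - i ≤ fuel) :
    checkLoop fuel cs i = go (cs.drop i) := by
  induction fuel generalizing i with
  | zero =>
    rw [checkLoop, List.drop_of_length_le (by omega)]
    simp [go]
  | succ fuel ih =>
    rw [checkLoop]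
    by_cases h : i < cs.length
    · simp only [h, dite_true]
      have hs3 : PySem.List.slice cs (some (i : Int)) (some ((i + 3 : Nat) : Int))
          = (cs.drop i).take 3 := by
        rw [PySem.List.slice_natCast]; congr 1; omega
      have hs2 : PySem.List.slice cs (some (i : Int)) (some ((i + 2 : Nat) : Int))
          = (cs.drop i).take 2 := by
        rw [PySem.List.slice_natCast]; congr 1; omega
      have hget : (cs.drop i)[0]? = cs[i]? := by simp
      rcases hL : cs.drop i with - | ⟨a, - | ⟨b, - | ⟨c, r⟩⟩⟩
      · exfalso
        have := congrArg List.length hL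
        simp [List.length_drop] at this
        omega
      · rw [hL, List.getElem?_eq_getElem h] at hget
        have ha : cs[i] = a := by simpa using hget.symm
        have hD1 : cs.drop (i + 1) = [] := by
          have h' := congrArg (List.drop 1) hL
          rw [List.drop_drop] at h'
          simpa [Nat.add_comm] using h'
        rw [hs3, hs2, hL, ha]
        rw [if_neg (by simp), if_neg (by simp)]
        by_cases haF : a = 'F'
        · subst haF
          rw [if_pos rfl, ih (i + 1) (by omega), hD1]
          simp [go]
        · rw [if_neg haF]
          simp [go, haF]
      · rw [hL, List.getElem?_eq_getElem h] at hget
        have ha : cs[i] = a := by simpa using hget.symm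
        have hD2 : cs.drop (i + 2) = [] := by
          have h' := congrArg (List.drop 2) hL
          rw [List.drop_drop] at h'
          simpa [Nat.add_comm] using h'
        have hD1 : cs.drop (i + 1) = [b] := by
          have h' := congrArg (List.drop 1) hL
          rw [List.drop_drop] at h'
          simpa [Nat.add_comm] using h'
        rw [hs3, hs2, hL, ha]
        rw [if_neg (by simp)]
        by_cases hab : ([a, b] : List Char) = ['F', 'D']
        · rw [if_pos (by simpa using hab), ih (i + 2) (by omega), hD2]
          obtain ⟨rfl, rfl⟩ : a = 'F' ∧ b = 'D' := by simpa using hab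
          simp [go]
        · rw [if_neg (by simpa using hab)]
          by_cases haF : a = 'F'
          · subst haF
            have hbD : b ≠ 'D' := fun hb => hab (by rw [hb])
            rw [if_pos rfl, ih (i + 1) (by omega), hD1]
            simp [go, hbD]
          · rw [if_neg haF]
            simp [go, haF]
      · rw [hL, List.getElem?_eq_getElem h] at hget
        have ha : cs[i] = a := by simpa using hget.symm
        have hD3 : cs.drop (i + 3) = r := by
          have h' := congrArg (List.drop 3) hL
          rw [List.drop_drop] at h'
          simpa [Nat.add_comm] using h'
        have hD2 : cs.drop (i + 2) = c :: r := by
          have h' := congrArg (List.drop 2) hL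
          rw [List.drop_drop] at h'
          simpa [Nat.add_comm] using h'
        have hD1 : cs.drop (i + 1) = b :: c :: r := by
          have h' := congrArg (List.drop 1) hL
          rw [List.drop_drop] at h'
          simpa [Nat.add_comm] using h'
        rw [hs3, hs2, hL, ha]
        by_cases h3 : ([a, b, c] : List Char) = ['F', 'D', 'D']
        · rw [if_pos (by simpa using h3), ih (i + 3) (by omega), hD3]
          obtain ⟨rfl, rfl, rfl⟩ : a = 'F' ∧ b = 'D' ∧ c = 'D' := by simpa using h3
          simp [go]
        · rw [if_neg (by simpa using h3)]
          by_cases hab : ([a, b] : List Char) = ['F', 'D']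
          · obtain ⟨rfl, rfl⟩ : a = 'F' ∧ b = 'D' := by simpa using hab
            have hcD : c ≠ 'D' := fun hcd => h3 (by rw [hcd])
            rw [if_pos (by simp), ih (i + 2) (by omega), hD2]
            simp [go, hcD]
          · rw [if_neg (by simpa using hab)]
            by_cases haF : a = 'F'
            · subst haF
              have hbD : b ≠ 'D' := fun hb => hab (by rw [hb])
              rw [if_pos rfl, ih (i + 1) (by omega), hD1]
              simp [go, hbD]
            · rw [if_neg haF]
              simp [go, haF]
    · simp only [h, dite_false]
      rw [List.drop_of_length_le (by omega)]
      simp [go]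

theorem check_spec : Claim_equal_check := by
  intro S _
  unfold Spec_check check check_alt
  rw [loop_eq_go S.toList.length S.toList 0 (by omega), List.drop_zero]
  have htD : ("D" : String).toList = ['D'] := rfl
  have htDDD : ("DDD" : String).toList = ['D', 'D', 'D'] := rfl
  have hsw : PySem.Str.startswith S "D" = PySem.Chars.startswith S.toList ['D'] := by
    rw [PySem.Str.startswith_eq, htD]
  have hin : PySem.Str.isIn "DDD" S = PySem.Chars.isIn ['D', 'D', 'D'] S.toList := by
    rw [PySem.Str.isIn_eq, htDDD]
  by_cases hOk : Ok S.toList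
  · rw [(go_yes_iff _).mpr hOk]
    obtain ⟨h1, h2, h3⟩ := hOk
    have b1 : (S.toList.any fun c => !(c == 'F' || c == 'D')) = false := by
      simp only [List.any_eq_false]
      intro c hc
      rcases h1 c hc with rfl | rfl <;> simp
    have b2 : PySem.Chars.startswith S.toList ['D'] = false := by
      rw [Bool.eq_false_iff]
      intro hT
      exact h2 ((PySem.Chars.startswith_iff _ _).mp hT)
    have b3 : PySem.Chars.isIn ['D', 'D', 'D'] S.toList = false :=
      (PySem.Chars.isIn_eq_false_iff _ _).mpr h3
    rw [b1, hsw, hin, b2, b3]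
    simp
  · have hno : go S.toList = "No" := by
      rcases go_yes_or_no S.toList with hy | hn
      · exact absurd ((go_yes_iff _).mp hy) hOk
      · exact hn
    rw [hno, hsw, hin]
    by_cases b1 : (S.toList.any fun c => !(c == 'F' || c == 'D')) = true
    · rw [if_pos b1]
    · rw [if_neg b1]
      by_cases b2 : (PySem.Chars.startswith S.toList ['D'] || PySem.Chars.isIn ['D', 'D', 'D'] S.toList) = true
      · rw [if_pos b2]
      · exfalso
        apply hOk
        rw [Bool.not_eq_true, Bool.or_eq_false_iff] at b2
        obtain ⟨c2, c3⟩ := b2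
        rw [Bool.not_eq_true, List.any_eq_false] at b1
        refine ⟨?_, fun hp => ?_, (PySem.Chars.isIn_eq_false_iff _ _).mp c3⟩
        · intro ch hc
          have hb := b1 ch hc
          simp at hb
          by_cases hF : ch = 'F'
          · exact Or.inl hF
          · exact Or.inr (hb hF)
        · exact absurd ((PySem.Chars.startswith_iff _ _).mpr hp) (by simp [c2])
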